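-- pv_equiv track=rewrite | github.com/pypi-data/pypi-mirror-402 | packages/ecp-reference/ecp_reference-1.0.0-py3-none-any.whl/ecp_reference/maintenance.py | diff_file_manifests
-- ===== SOURCE A (Python) =====
-- def diff_file_manifests(old: dict, new: dict) -> tuple[list[str], list[str]]:
--     old_keys = set(old.keys())
--     new_keys = set(new.keys())
--     removed = sorted(old_keys - new_keys)
--     added = sorted(new_keys - old_keys)
--     changed = []
--     for k in sorted(old_keys & new_keys):
--         if old[k].get("sha256") != new[k].get("sha256"):
--             changed.append(k)
--     return sorted(set(changed + added)), removed
-- ===== SOURCE B (Python) =====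
-- def diff_file_manifests(old: dict, new: dict) -> tuple[list[str], list[str]]:
--     removed = sorted(old.keys() - new.keys())
--     changed = sorted(
--         k for k in new
--         if k not in old or old[k].get("sha256") != new[k].get("sha256")
--     )
--     return changed, removed
-- ===== Notes on version B (the rewrite author's own statement) =====
-- stated objective: simpler
-- what changed: Folds A's separate added set-difference, sorted-intersection changed-loop and final set+re-sort into one predicate-based comprehension over new (a key is in the first list iff it is new-only or its sha256 changed); removed stays a set difference.
import Mathlib
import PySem

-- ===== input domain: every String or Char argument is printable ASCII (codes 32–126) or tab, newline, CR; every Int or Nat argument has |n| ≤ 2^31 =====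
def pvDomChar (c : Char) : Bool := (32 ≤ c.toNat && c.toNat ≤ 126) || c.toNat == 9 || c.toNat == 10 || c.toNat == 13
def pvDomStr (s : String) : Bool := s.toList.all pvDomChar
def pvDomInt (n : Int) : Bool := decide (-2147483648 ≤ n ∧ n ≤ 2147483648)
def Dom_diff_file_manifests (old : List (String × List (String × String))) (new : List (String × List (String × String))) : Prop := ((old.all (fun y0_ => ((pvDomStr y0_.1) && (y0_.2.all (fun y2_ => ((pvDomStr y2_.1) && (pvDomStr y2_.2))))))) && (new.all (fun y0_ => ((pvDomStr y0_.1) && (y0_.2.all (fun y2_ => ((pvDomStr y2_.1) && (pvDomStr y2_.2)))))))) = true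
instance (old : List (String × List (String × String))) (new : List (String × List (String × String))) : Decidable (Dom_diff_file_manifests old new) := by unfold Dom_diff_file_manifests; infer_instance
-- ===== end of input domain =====

-- B folds A's separate added set-difference, changed-loop and final set+re-sort into one
-- predicate-based pass over new; same values, simpler decomposition (no speed claim).

-- old[k].get("sha256") / new[k].get("sha256")  (k always present where evaluated by A; total via getD)
def pvSha (d : List (String × List (String × String))) (k : String) : Option String :=
  PySem.Dict.get? (PySem.Dict.mk ((PySem.Dict.mk d).getD k [])) "sha256"

-- ===== PORT A =====
def diff_file_manifests (old : List (String × List (String × String))) (new : List (String × List (String × String))) : List String × List String :=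
  let old_keys : PySem.Set String := PySem.Set.ofList ((PySem.Dict.mk old).keys)
  let new_keys : PySem.Set String := PySem.Set.ofList ((PySem.Dict.mk new).keys)
  let removed := PySem.List.sorted (PySem.Set.diff old_keys new_keys) (fun x => x) false
  let added := PySem.List.sorted (PySem.Set.diff new_keys old_keys) (fun x => x) false
  let changed := (PySem.List.sorted (PySem.Set.inter old_keys new_keys) (fun x => x) false).foldl
      (fun acc k => if pvSha old k ≠ pvSha new k then acc ++ [k] else acc) []
  (PySem.List.sorted (PySem.Set.ofList (changed ++ added)) (fun x => x) false, removed)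

-- ===== PORT B =====
def diff_file_manifests_alt (old : List (String × List (String × String))) (new : List (String × List (String × String))) : List String × List String :=
  let removed := PySem.List.sorted
      (PySem.Set.diff (PySem.Set.ofList ((PySem.Dict.mk old).keys)) (PySem.Set.ofList ((PySem.Dict.mk new).keys)))
      (fun x => x) false
  let changed := PySem.List.sorted
      ((PySem.List.dedup ((PySem.Dict.mk new).keys)).filter
        (fun k => !(PySem.Dict.contains (PySem.Dict.mk old) k) || decide (pvSha old k ≠ pvSha new k)))
      (fun x => x) false
  (changed, removed)

-- ===== PRECONDITION & SPEC =====
def Spec_diff_file_manifests (old : List (String × List (String × String))) (new : List (String × List (String × String))) (out : List String × List String) : Prop := out = diff_file_manifests_alt old new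
instance (old : List (String × List (String × String))) (new : List (String × List (String × String))) (out : List String × List String) : Decidable (Spec_diff_file_manifests old new out) := by unfold Spec_diff_file_manifests; infer_instance

-- ===== CLAIM (what is proved, stated in full; the proofs are below) =====
def Claim_equal_diff_file_manifests : Prop := ∀ (old : List (String × List (String × String))) (new : List (String × List (String × String))), Dom_diff_file_manifests old new → Spec_diff_file_manifests old new (diff_file_manifests old new)

-- ===== LEMMAS AND PROOFS =====

lemma first_components_perm (old new : List (String × List (String × String))) :
    (PySem.Set.ofList
      (((PySem.List.sorted (PySem.Set.inter (PySem.Set.ofList ((PySem.Dict.mk old).keys)) (PySem.Set.ofList ((PySem.Dict.mk new).keys))) (fun x => x) false).foldl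
          (fun acc k => if pvSha old k ≠ pvSha new k then acc ++ [k] else acc) [])
        ++ PySem.List.sorted (PySem.Set.diff (PySem.Set.ofList ((PySem.Dict.mk new).keys)) (PySem.Set.ofList ((PySem.Dict.mk old).keys))) (fun x => x) false)).Perm
    ((PySem.List.dedup ((PySem.Dict.mk new).keys)).filter
      (fun k => !(PySem.Dict.contains (PySem.Dict.mk old) k) || decide (pvSha old k ≠ pvSha new k))) := by
  rw [List.perm_ext_iff_of_nodup (PySem.Set.nodup_ofList _) ((PySem.List.nodup_dedup _).filter _)]
  intro a
  have hc := PySem.Dict.contains_iff_mem_keys (PySem.Dict.mk old) a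
  have hfold := PySem.List.foldl_append_if (fun k => decide (pvSha old k ≠ pvSha new k)) (fun k => k)
      (PySem.List.sorted (PySem.Set.inter (PySem.Set.ofList ((PySem.Dict.mk old).keys)) (PySem.Set.ofList ((PySem.Dict.mk new).keys))) (fun x => x) false) []
  simp only [decide_eq_true_eq, List.map_id'] at hfold
  rw [hfold]
  simp only [PySem.Set.mem_ofList, List.mem_append, List.nil_append, List.mem_filter,
    PySem.List.mem_dedup, PySem.List.mem_sorted, PySem.Set.mem_inter, PySem.Set.mem_diff,
    Bool.or_eq_true, Bool.not_eq_true', decide_eq_true_eq]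
  constructor
  · rintro ((⟨⟨ho, hn⟩, hd⟩) | ⟨hn, ho⟩)
    · exact ⟨hn, Or.inr hd⟩
    · refine ⟨hn, Or.inl ?_⟩
      rw [Bool.eq_false_iff]
      intro h; exact ho (hc.mp h)
  · rintro ⟨hn, (ho | hd)⟩
    · refine Or.inr ⟨hn, fun h => ?_⟩
      rw [Bool.eq_false_iff] at ho; exact ho (hc.mpr h)
    · by_cases ho : a ∈ (PySem.Dict.mk old).keys
      · exact Or.inl ⟨⟨ho, hn⟩, hd⟩
      · exact Or.inr ⟨hn, ho⟩

theorem diff_spec_aux (old new : List (String × List (String × String))) :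
    diff_file_manifests old new = diff_file_manifests_alt old new := by
  unfold diff_file_manifests diff_file_manifests_alt
  refine Prod.ext ?_ rfl
  exact PySem.List.sorted_eq_sorted_of_perm _ _ (fun x => x) (fun a b h => h)
    (first_components_perm old new)

-- ===== VERDICT (by name: the statement is the Claim_ definition above) =====
theorem diff_file_manifests_spec : Claim_equal_diff_file_manifests := by
  intro old new _
  exact diff_spec_aux old new
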